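-- pv_equiv track=rewrite | github.com/ankitjain91/opspilot | python/agent_server/server.py | compute_coverage_snapshot
-- ===== SOURCE A (Python) =====
-- def compute_coverage_snapshot(state: dict) -> dict:
--     """Assess whether key signals were collected during investigation."""
--     hist = [h for h in (state.get('command_history') or []) if h]
--     outputs = "\n".join([(h.get('command','') + "\n" + (h.get('output','') or '')) for h in hist])
--     def seen(substr: str) -> bool:
--         return substr in outputs
--     return {
--         'nodes_checked': any('kubectl get nodes' in (h.get('command','')) for h in hist) or seen('NAME   STATUS'),
--         'pods_checked': any('kubectl get pods' in (h.get('command','')) for h in hist) or seen('No resources found') or seen('Running') or seen('CrashLoopBackOff'),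
--         'events_checked': any('kubectl get events' in (h.get('command','')) for h in hist) or seen('Warning') or seen('Normal'),
--         'resource_usage_checked': any('kubectl top' in (h.get('command','')) for h in hist) or seen('CPU') or seen('Memory'),
--     }
-- ===== SOURCE B (Python) =====
-- def compute_coverage_snapshot(state: dict) -> dict:
--     """Assess whether key signals were collected during investigation.
--
--     Single pass over the filtered history, OR-ing four flag accumulators;
--     every signal substring is newline-free, so testing each entry's command
--     and output separately equals scanning the newline-joined combined string.
--     """
--     nodes = pods = events = usage = False
--     for h in (state.get('command_history') or []):
--         if not h:
--             continue
--         cmd = h.get('command', '')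
--         out = h.get('output', '') or ''
--         def hit(s):
--             return s in cmd or s in out
--         nodes = nodes or 'kubectl get nodes' in cmd or hit('NAME   STATUS')
--         pods = (pods or 'kubectl get pods' in cmd or hit('No resources found')
--                 or hit('Running') or hit('CrashLoopBackOff'))
--         events = events or 'kubectl get events' in cmd or hit('Warning') or hit('Normal')
--         usage = usage or 'kubectl top' in cmd or hit('CPU') or hit('Memory')
--     return {'nodes_checked': nodes, 'pods_checked': pods,
--             'events_checked': events, 'resource_usage_checked': usage}
-- ===== Notes on version B (the rewrite author's own statement) =====
-- stated objective: alternative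
-- what changed: Instead of building the newline-joined combined string and running four any-scans plus eleven substring scans over it, B makes a single pass over the history, OR-ing four flag accumulators and testing each entry's command and output separately (valid because every signal substring is newline-free).
import Mathlib
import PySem

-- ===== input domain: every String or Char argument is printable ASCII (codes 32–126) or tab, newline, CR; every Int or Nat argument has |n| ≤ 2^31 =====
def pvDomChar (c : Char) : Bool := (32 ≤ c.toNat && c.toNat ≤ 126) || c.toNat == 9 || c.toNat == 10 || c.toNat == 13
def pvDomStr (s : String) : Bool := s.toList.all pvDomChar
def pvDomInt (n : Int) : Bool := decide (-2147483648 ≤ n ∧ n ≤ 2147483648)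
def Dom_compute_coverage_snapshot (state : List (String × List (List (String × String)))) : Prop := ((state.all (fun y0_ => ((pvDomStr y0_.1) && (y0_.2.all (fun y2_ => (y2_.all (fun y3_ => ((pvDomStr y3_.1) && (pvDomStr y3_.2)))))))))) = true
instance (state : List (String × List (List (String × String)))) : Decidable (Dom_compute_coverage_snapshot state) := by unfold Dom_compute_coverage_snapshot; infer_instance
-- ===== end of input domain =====

-- B replaces A's build-the-joined-string-and-scan-it-eleven-times by ONE pass over the
-- history that ORs four flag accumulators, testing each entry's command and output
-- separately (every signal substring is newline-free, so this is exact). Objective: alternative.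

-- ===== PORT A =====
-- literal port of A: filter the history, join command+"\n"+output with "\n", then
-- four `any` scans over commands plus `seen` substring tests on the combined string.
-- (h.get('output','') or '' : the value is always a string here, and '' or '' = '',
--  so the `or ''` is the identity and is ported as the plain getD.)
def compute_coverage_snapshot (state : List (String × List (List (String × String)))) : List (String × Bool) :=
  let hist := ((PySem.Dict.get? (PySem.Dict.mk state) "command_history").getD []).filter
      (fun h => decide (h ≠ []))
  let outputs := PySem.Str.join "\n" (hist.map (fun h =>
      PySem.Dict.getD (PySem.Dict.mk h) "command" "" ++ "\n" ++
      PySem.Dict.getD (PySem.Dict.mk h) "output" ""))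
  let seen := fun (substr : String) => PySem.Str.isIn substr outputs
  [("nodes_checked",
      (hist.any (fun h => PySem.Str.isIn "kubectl get nodes" (PySem.Dict.getD (PySem.Dict.mk h) "command" ""))
        || seen "NAME   STATUS")),
   ("pods_checked",
      (hist.any (fun h => PySem.Str.isIn "kubectl get pods" (PySem.Dict.getD (PySem.Dict.mk h) "command" ""))
        || seen "No resources found" || seen "Running" || seen "CrashLoopBackOff")),
   ("events_checked",
      (hist.any (fun h => PySem.Str.isIn "kubectl get events" (PySem.Dict.getD (PySem.Dict.mk h) "command" ""))
        || seen "Warning" || seen "Normal")),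
   ("resource_usage_checked",
      (hist.any (fun h => PySem.Str.isIn "kubectl top" (PySem.Dict.getD (PySem.Dict.mk h) "command" ""))
        || seen "CPU" || seen "Memory"))]

-- ===== PORT B =====
def pvHit (s cmd outp : String) : Bool := PySem.Str.isIn s cmd || PySem.Str.isIn s outp

def pvStep (acc : Bool × Bool × Bool × Bool) (h : List (String × String)) : Bool × Bool × Bool × Bool :=
  if h = [] then acc else
  let cmd := PySem.Dict.getD (PySem.Dict.mk h) "command" ""
  let outp := PySem.Dict.getD (PySem.Dict.mk h) "output" ""
  (acc.1 || PySem.Str.isIn "kubectl get nodes" cmd || pvHit "NAME   STATUS" cmd outp,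
   acc.2.1 || PySem.Str.isIn "kubectl get pods" cmd || pvHit "No resources found" cmd outp
     || pvHit "Running" cmd outp || pvHit "CrashLoopBackOff" cmd outp,
   acc.2.2.1 || PySem.Str.isIn "kubectl get events" cmd || pvHit "Warning" cmd outp
     || pvHit "Normal" cmd outp,
   acc.2.2.2 || PySem.Str.isIn "kubectl top" cmd || pvHit "CPU" cmd outp
     || pvHit "Memory" cmd outp)

def compute_coverage_snapshot_alt (state : List (String × List (List (String × String)))) : List (String × Bool) :=
  let r := ((PySem.Dict.get? (PySem.Dict.mk state) "command_history").getD []).foldl pvStep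
      (false, false, false, false)
  [("nodes_checked", r.1), ("pods_checked", r.2.1),
   ("events_checked", r.2.2.1), ("resource_usage_checked", r.2.2.2)]

-- ===== PRECONDITION & SPEC =====
def Spec_compute_coverage_snapshot (state : List (String × List (List (String × String)))) (out : List (String × Bool)) : Prop := out = compute_coverage_snapshot_alt state
instance (state : List (String × List (List (String × String)))) (out : List (String × Bool)) : Decidable (Spec_compute_coverage_snapshot state out) := by unfold Spec_compute_coverage_snapshot; infer_instance

-- ===== CLAIM (what is proved, stated in full; the proofs are below) =====
def Claim_equal_compute_coverage_snapshot : Prop := ∀ (state : List (String × List (List (String × String)))), Dom_compute_coverage_snapshot state → Spec_compute_coverage_snapshot state (compute_coverage_snapshot state)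

-- ===== LEMMAS AND PROOFS =====

-- a prefix of a ++ c :: b avoiding c is a prefix of a
theorem pv_prefix_split {α : Type} {sub a b : List α} {c : α} (hc : c ∉ sub)
    (h : sub <+: a ++ c :: b) : sub <+: a := by
  induction sub generalizing a with
  | nil => exact List.nil_prefix
  | cons s ss ih =>
    cases a with
    | nil =>
      rw [List.nil_append] at h
      rcases List.cons_prefix_cons.mp h with ⟨rfl, _⟩
      exact absurd (List.mem_cons_self) hc
    | cons x a' =>
      rw [List.cons_append] at h
      rcases List.cons_prefix_cons.mp h with ⟨he, h'⟩
      exact List.cons_prefix_cons.mpr ⟨he, ih (fun hm => hc (List.mem_cons_of_mem _ hm)) h'⟩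

-- an occurrence of a c-free word in a ++ c :: b lies in a or in b
theorem pv_infix_split {α : Type} {sub : List α} (a b : List α) {c : α} (hc : c ∉ sub) :
    sub <:+: a ++ c :: b ↔ (sub <:+: a ∨ sub <:+: b) := by
  constructor
  · intro h
    induction a with
    | nil =>
      rw [List.nil_append] at h
      rcases List.infix_cons_iff.mp h with hp | hi
      · cases sub with
        | nil => exact Or.inl List.nil_infix
        | cons s ss =>
          rcases List.cons_prefix_cons.mp hp with ⟨rfl, _⟩
          exact absurd (List.mem_cons_self) hc
      · exact Or.inr hi
    | cons x a' ih =>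
      rw [List.cons_append] at h
      rcases List.infix_cons_iff.mp h with hp | hi
      · exact Or.inl (pv_prefix_split hc (by simpa using hp)).isInfix
      · rcases ih hi with h1 | h2
        · exact Or.inl (h1.trans (List.suffix_cons x a').isInfix)
        · exact Or.inr h2
  · rintro (h | h)
    · exact h.trans (List.prefix_append a (c :: b)).isInfix
    · exact h.trans ((List.suffix_cons c b).trans (List.suffix_append a (c :: b))).isInfix

theorem pv_isIn_cons_mid (sub u v : List Char) {c : Char} (hc : c ∉ sub) :
    PySem.Chars.isIn sub (u ++ c :: v) = (PySem.Chars.isIn sub u || PySem.Chars.isIn sub v) := by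
  rw [Bool.eq_iff_iff]
  simp only [Bool.or_eq_true, PySem.Chars.isIn_iff_infix]
  exact pv_infix_split u v hc

theorem pv_isIn_join (sub : List Char) {c : Char} (hne : sub ≠ []) (hc : c ∉ sub) :
    ∀ parts, PySem.Chars.isIn sub (PySem.Chars.join [c] parts)
      = parts.any (fun p => PySem.Chars.isIn sub p)
  | [] => by
      rw [PySem.Chars.join_nil, Bool.eq_iff_iff]
      simp [PySem.Chars.isIn_iff_infix, hne]
  | [p] => by rw [PySem.Chars.join_singleton]; simp
  | p :: q :: rest => by
      rw [PySem.Chars.join_cons_cons,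
          show p ++ [c] ++ PySem.Chars.join [c] (q :: rest)
             = p ++ c :: PySem.Chars.join [c] (q :: rest) by simp,
          pv_isIn_cons_mid _ _ _ hc, pv_isIn_join sub hne hc (q :: rest)]
      simp

theorem pv_any_or {α : Type} (l : List α) (f g : α → Bool) :
    l.any (fun x => f x || g x) = (l.any f || l.any g) := by
  induction l with
  | nil => rfl
  | cons x t ih =>
    simp only [List.any_cons, ih]
    cases f x <;> cases g x <;> simp

-- the four per-entry tests B accumulates (proof-side names for pvStep's components)
def pvG1 (h : List (String × String)) : Bool :=
  if h = [] then false else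
  PySem.Str.isIn "kubectl get nodes" (PySem.Dict.getD (PySem.Dict.mk h) "command" "")
    || pvHit "NAME   STATUS" (PySem.Dict.getD (PySem.Dict.mk h) "command" "") (PySem.Dict.getD (PySem.Dict.mk h) "output" "")
def pvG2 (h : List (String × String)) : Bool :=
  if h = [] then false else
  PySem.Str.isIn "kubectl get pods" (PySem.Dict.getD (PySem.Dict.mk h) "command" "")
    || pvHit "No resources found" (PySem.Dict.getD (PySem.Dict.mk h) "command" "") (PySem.Dict.getD (PySem.Dict.mk h) "output" "")
    || pvHit "Running" (PySem.Dict.getD (PySem.Dict.mk h) "command" "") (PySem.Dict.getD (PySem.Dict.mk h) "output" "")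
    || pvHit "CrashLoopBackOff" (PySem.Dict.getD (PySem.Dict.mk h) "command" "") (PySem.Dict.getD (PySem.Dict.mk h) "output" "")
def pvG3 (h : List (String × String)) : Bool :=
  if h = [] then false else
  PySem.Str.isIn "kubectl get events" (PySem.Dict.getD (PySem.Dict.mk h) "command" "")
    || pvHit "Warning" (PySem.Dict.getD (PySem.Dict.mk h) "command" "") (PySem.Dict.getD (PySem.Dict.mk h) "output" "")
    || pvHit "Normal" (PySem.Dict.getD (PySem.Dict.mk h) "command" "") (PySem.Dict.getD (PySem.Dict.mk h) "output" "")
def pvG4 (h : List (String × String)) : Bool :=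
  if h = [] then false else
  PySem.Str.isIn "kubectl top" (PySem.Dict.getD (PySem.Dict.mk h) "command" "")
    || pvHit "CPU" (PySem.Dict.getD (PySem.Dict.mk h) "command" "") (PySem.Dict.getD (PySem.Dict.mk h) "output" "")
    || pvHit "Memory" (PySem.Dict.getD (PySem.Dict.mk h) "command" "") (PySem.Dict.getD (PySem.Dict.mk h) "output" "")

-- B's fold is the entrywise OR of the four tests
theorem pv_foldl_step (l : List (List (String × String))) :
    ∀ q : Bool × Bool × Bool × Bool,
    l.foldl pvStep q = (q.1 || l.any pvG1, q.2.1 || l.any pvG2,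
                        q.2.2.1 || l.any pvG3, q.2.2.2 || l.any pvG4) := by
  induction l with
  | nil => intro q; simp
  | cons h t ih =>
    intro q
    simp only [List.foldl_cons, List.any_cons, ih, pvStep, pvG1, pvG2, pvG3, pvG4]
    split
    · simp
    · simp [Bool.or_assoc]

-- A's `seen substr` equals an entrywise scan, for newline-free nonempty substr
theorem pv_seen_eq (hist : List (List (String × String))) (sub : String)
    (hne : sub.toList ≠ []) (hc : '\n' ∉ sub.toList) :
    PySem.Str.isIn sub (PySem.Str.join "\n" (hist.map (fun h =>
        PySem.Dict.getD (PySem.Dict.mk h) "command" "" ++ "\n" ++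
        PySem.Dict.getD (PySem.Dict.mk h) "output" "")))
      = hist.any (fun h =>
          PySem.Str.isIn sub (PySem.Dict.getD (PySem.Dict.mk h) "command" "")
          || PySem.Str.isIn sub (PySem.Dict.getD (PySem.Dict.mk h) "output" "")) := by
  unfold PySem.Str.isIn
  rw [PySem.Str.toList_join]
  have hsep : ("\n" : String).toList = ['\n'] := rfl
  rw [hsep, List.map_map, pv_isIn_join sub.toList hne hc, List.any_map]
  congr 1
  funext h
  show PySem.Chars.isIn sub.toList
      ((PySem.Dict.getD (PySem.Dict.mk h) "command" "" ++ "\n" ++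
        PySem.Dict.getD (PySem.Dict.mk h) "output" "").toList) = _
  rw [show (PySem.Dict.getD (PySem.Dict.mk h) "command" "" ++ "\n" ++
        PySem.Dict.getD (PySem.Dict.mk h) "output" "").toList
      = (PySem.Dict.getD (PySem.Dict.mk h) "command" "").toList ++
        '\n' :: (PySem.Dict.getD (PySem.Dict.mk h) "output" "").toList by
      simp [String.toList_append]]
  exact pv_isIn_cons_mid _ _ _ hc

-- ===== VERDICT (by name: the statement is the Claim_ definition above) =====
theorem compute_coverage_snapshot_spec : Claim_equal_compute_coverage_snapshot := by
  intro state _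
  unfold Spec_compute_coverage_snapshot compute_coverage_snapshot compute_coverage_snapshot_alt
  rw [pv_foldl_step]
  set raw := (PySem.Dict.get? (PySem.Dict.mk state) "command_history").getD [] with hraw
  simp only [Bool.false_or]
  refine congrArg₂ _ (congrArg _ ?_) (congrArg₂ _ (congrArg _ ?_)
    (congrArg₂ _ (congrArg _ ?_) (congrArg₂ _ (congrArg _ ?_) rfl)))
  · rw [pv_seen_eq _ _ (by decide) (by decide), ← pv_any_or, List.any_filter]
    congr 1; funext h
    by_cases hh : h = [] <;> simp [hh, pvG1, pvHit]
  · rw [pv_seen_eq _ _ (by decide) (by decide), pv_seen_eq _ _ (by decide) (by decide),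
        pv_seen_eq _ _ (by decide) (by decide), ← pv_any_or, ← pv_any_or, ← pv_any_or,
        List.any_filter]
    congr 1; funext h
    by_cases hh : h = [] <;> simp [hh, pvG2, pvHit, Bool.or_assoc]
  · rw [pv_seen_eq _ _ (by decide) (by decide), pv_seen_eq _ _ (by decide) (by decide),
        ← pv_any_or, ← pv_any_or, List.any_filter]
    congr 1; funext h
    by_cases hh : h = [] <;> simp [hh, pvG3, pvHit, Bool.or_assoc]
  · rw [pv_seen_eq _ _ (by decide) (by decide), pv_seen_eq _ _ (by decide) (by decide),
        ← pv_any_or, ← pv_any_or, List.any_filter]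
    congr 1; funext h
    by_cases hh : h = [] <;> simp [hh, pvG4, pvHit, Bool.or_assoc]
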